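-- pv_equiv track=rewrite | github.com/IvanKogut11/KIT-Editorials | Tinkoff_Generation/Summer_2023/CB_6.py | calc_off_days_to_use
-- ===== SOURCE A (Python) =====
-- def calc_off_days_to_use(l, r, w, is_off_day):
--     off_days_to_use = 0
--     c = 1
--     for d in range(l, r + 1):
--         if (d + w) % 7 >= 5:
--             off_days_to_use += 1
--         if is_off_day[d]:
--             c = 1
--             continue
--         if c == 7:
--             off_days_to_use -= 1
--             c = 1
--             continue
--         c += 1
--     return off_days_to_use
-- ===== SOURCE B (Python) =====
-- def calc_off_days_to_use(l, r, w, is_off_day):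
--     if l > r:
--         return 0
--     # closed-form count of d in [l, r] with (d + w) % 7 in {5, 6}
--     weekends = ((r + w - 5) // 7 - (l - 1 + w - 5) // 7) \
--              + ((r + w - 6) // 7 - (l - 1 + w - 6) // 7)
--     # separate scan: subtract one per 7 consecutive working days
--     sub = 0
--     run = 0
--     for d in range(l, r + 1):
--         if is_off_day[d]:
--             run = 0
--         else:
--             run += 1
--             if run == 7:
--                 sub += 1
--                 run = 0
--     return weekends - sub
-- ===== Notes on version B (the rewrite author's own statement) =====
-- stated objective: simpler
-- what changed: The weekend count is computed in closed form by floor-division arithmetic instead of a per-day residue test, and the remaining loop only tracks the run length of consecutive working days to subtract one per full week of work, instead of A's fused loop mixing both counts in one state machine.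
import Mathlib
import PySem

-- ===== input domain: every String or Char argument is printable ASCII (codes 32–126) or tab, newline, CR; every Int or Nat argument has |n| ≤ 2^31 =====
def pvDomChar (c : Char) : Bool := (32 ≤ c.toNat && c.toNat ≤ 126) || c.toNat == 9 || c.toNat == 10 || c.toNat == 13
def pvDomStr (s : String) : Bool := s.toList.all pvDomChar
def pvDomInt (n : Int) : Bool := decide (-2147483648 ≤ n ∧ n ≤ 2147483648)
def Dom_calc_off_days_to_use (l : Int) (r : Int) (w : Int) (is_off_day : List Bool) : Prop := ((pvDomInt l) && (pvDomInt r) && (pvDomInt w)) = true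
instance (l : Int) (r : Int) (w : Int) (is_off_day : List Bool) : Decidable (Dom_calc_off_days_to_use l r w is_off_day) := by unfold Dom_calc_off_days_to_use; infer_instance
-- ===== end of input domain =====

-- B replaces A's fused loop by a closed-form weekend count plus a separate run-length scan (objective: simpler).


-- ===== PORT A =====
-- A's loop body: state (off_days_to_use, c)
def pvStepA (w : Int) (is_off_day : List Bool) (st : Int × Int) (d : Int) : Int × Int :=
  let o := if PySem.Int.mod (d + w) 7 ≥ 5 then st.1 + 1 else st.1
  if PySem.List.pyGetD is_off_day d false then (o, 1)
  else if st.2 = 7 then (o - 1, 1)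
  else (o, st.2 + 1)

def calc_off_days_to_use (l : Int) (r : Int) (w : Int) (is_off_day : List Bool) : Int :=
  (((PySem.List.pyRange l (r + 1) 1).foldl (pvStepA w is_off_day) (0, 1))).1

-- ===== PORT B =====
-- B's loop body: state (sub, run)
def pvStepB (is_off_day : List Bool) (st : Int × Int) (d : Int) : Int × Int :=
  if PySem.List.pyGetD is_off_day d false then (st.1, 0)
  else if st.2 + 1 = 7 then (st.1 + 1, 0)
  else (st.1, st.2 + 1)

def calc_off_days_to_use_alt (l : Int) (r : Int) (w : Int) (is_off_day : List Bool) : Int :=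
  if l > r then 0
  else
    let weekends := (PySem.Int.floordiv (r + w - 5) 7 - PySem.Int.floordiv (l - 1 + w - 5) 7)
                  + (PySem.Int.floordiv (r + w - 6) 7 - PySem.Int.floordiv (l - 1 + w - 6) 7)
    let sr := (PySem.List.pyRange l (r + 1) 1).foldl (pvStepB is_off_day) (0, 0)
    weekends - sr.1

-- ===== PRECONDITION & SPEC =====
-- Pre_ excludes exactly the inputs on which A raises IndexError: a nonempty range containing a day outside [-len, len).
def Pre_calc_off_days_to_use (l : Int) (r : Int) (w : Int) (is_off_day : List Bool) : Prop :=
  r < l ∨ (-(is_off_day.length : Int) ≤ l ∧ r < (is_off_day.length : Int))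
instance (l : Int) (r : Int) (w : Int) (is_off_day : List Bool) : Decidable (Pre_calc_off_days_to_use l r w is_off_day) := by unfold Pre_calc_off_days_to_use; infer_instance
def pvWitness_calc_off_days_to_use : Int × Int × Int × List Bool := (0, 2, 3, [false, false, true])

def Spec_calc_off_days_to_use (l : Int) (r : Int) (w : Int) (is_off_day : List Bool) (out : Int) : Prop := out = calc_off_days_to_use_alt l r w is_off_day
instance (l : Int) (r : Int) (w : Int) (is_off_day : List Bool) (out : Int) : Decidable (Spec_calc_off_days_to_use l r w is_off_day out) := by unfold Spec_calc_off_days_to_use; infer_instance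

-- ===== CLAIM (what is proved, stated in full; the proofs are below) =====
def Claim_equal_calc_off_days_to_use : Prop := ∀ (l : Int) (r : Int) (w : Int) (is_off_day : List Bool), Dom_calc_off_days_to_use l r w is_off_day → Pre_calc_off_days_to_use l r w is_off_day → Spec_calc_off_days_to_use l r w is_off_day (calc_off_days_to_use l r w is_off_day)

-- ===== LEMMAS AND PROOFS =====

-- per-day weekend indicator
def pvWInd (w d : Int) : Int := if PySem.Int.mod (d + w) 7 ≥ 5 then 1 else 0

-- parallel-fold invariant: A's accumulator equals acc + weekend sum − B's subtraction count,
-- with A's counter c = run + 1.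
theorem pv_fold (r w : Int) (xs : List Bool) :
    ∀ (n : Nat) (l : Int), (r + 1 - l).toNat = n →
    ∀ (acc run s : Int), 0 ≤ run → run ≤ 6 →
      ((PySem.List.pyRange l (r + 1) 1).foldl (pvStepA w xs) (acc, run + 1)).1
        + ((PySem.List.pyRange l (r + 1) 1).foldl (pvStepB xs) (s, run)).1
      = acc + s + (((PySem.List.pyRange l (r + 1) 1).map (pvWInd w)).sum) := by
  intro n
  induction n with
  | zero =>
    intro l hl acc run s h0 h6
    rw [PySem.List.pyRange_one_eq_nil (by omega)]
    simp
  | succ m ih =>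
    intro l hl acc run s h0 h6
    rw [PySem.List.pyRange_one_cons (by omega)]
    simp only [List.foldl_cons, List.map_cons, List.sum_cons]
    by_cases hoff : PySem.List.pyGetD xs l false
    · have hA : pvStepA w xs (acc, run + 1) l
          = ((if PySem.Int.mod (l + w) 7 ≥ 5 then acc + 1 else acc), 1) := by
        simp [pvStepA, hoff]
      have hB : pvStepB xs (s, run) l = (s, 0) := by simp [pvStepB, hoff]
      rw [hA, hB]
      have := ih (l + 1) (by omega) (if PySem.Int.mod (l + w) 7 ≥ 5 then acc + 1 else acc) 0 s
        (by omega) (by omega)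
      simp only [zero_add] at this
      rw [this]
      unfold pvWInd; split_ifs <;> ring
    · by_cases h7 : run = 6
      · have hA : pvStepA w xs (acc, run + 1) l
            = ((if PySem.Int.mod (l + w) 7 ≥ 5 then acc + 1 else acc) - 1, 1) := by
          simp [pvStepA, hoff, h7]
        have hB : pvStepB xs (s, run) l = (s + 1, 0) := by simp [pvStepB, hoff, h7]
        rw [hA, hB]
        have := ih (l + 1) (by omega)
          ((if PySem.Int.mod (l + w) 7 ≥ 5 then acc + 1 else acc) - 1) 0 (s + 1)
          (by omega) (by omega)
        simp only [zero_add] at this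
        rw [this]
        unfold pvWInd; split_ifs <;> ring
      · have hA : pvStepA w xs (acc, run + 1) l
            = ((if PySem.Int.mod (l + w) 7 ≥ 5 then acc + 1 else acc), run + 1 + 1) := by
          simp [pvStepA, hoff]
          omega
        have hB : pvStepB xs (s, run) l = (s, run + 1) := by
          simp [pvStepB, hoff]
          omega
        rw [hA, hB]
        have := ih (l + 1) (by omega) (if PySem.Int.mod (l + w) 7 ≥ 5 then acc + 1 else acc)
          (run + 1) s (by omega) (by omega)
        rw [this]
        unfold pvWInd; split_ifs <;> ring

-- closed form for the weekend sum
theorem pv_closed (r w : Int) :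
    ∀ (n : Nat) (l : Int), l ≤ r + 1 → (r + 1 - l).toNat = n →
      (((PySem.List.pyRange l (r + 1) 1).map (pvWInd w)).sum)
      = (PySem.Int.floordiv (r + w - 5) 7 - PySem.Int.floordiv (l - 1 + w - 5) 7)
        + (PySem.Int.floordiv (r + w - 6) 7 - PySem.Int.floordiv (l - 1 + w - 6) 7) := by
  intro n
  induction n with
  | zero =>
    intro l hle hl
    rw [PySem.List.pyRange_one_eq_nil (by omega)]
    have h5 : l - 1 + w - 5 = r + w - 5 := by omega
    have h6 : l - 1 + w - 6 = r + w - 6 := by omega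
    rw [h5, h6]
    simp
  | succ m ih =>
    intro l hle hl
    rw [PySem.List.pyRange_one_cons (by omega)]
    simp only [List.map_cons, List.sum_cons]
    rw [ih (l + 1) (by omega) (by omega)]
    rw [PySem.Int.floordiv_eq_ediv_of_pos (by omega), PySem.Int.floordiv_eq_ediv_of_pos (by omega),
        PySem.Int.floordiv_eq_ediv_of_pos (by omega), PySem.Int.floordiv_eq_ediv_of_pos (by omega),
        PySem.Int.floordiv_eq_ediv_of_pos (by omega), PySem.Int.floordiv_eq_ediv_of_pos (by omega)]
    unfold pvWInd
    rw [PySem.Int.mod_eq_emod_of_pos (by omega)]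
    split_ifs with h <;> omega

-- ===== VERDICT (by name: the statement is the Claim_ definition above) =====
theorem calc_off_days_to_use_spec : Claim_equal_calc_off_days_to_use := by
  intro l r w xs _ _
  unfold Spec_calc_off_days_to_use calc_off_days_to_use calc_off_days_to_use_alt
  by_cases hlr : l > r
  · rw [PySem.List.pyRange_one_eq_nil (by omega)]
    simp [hlr]
  · simp only [hlr, if_false]
    have hfold := pv_fold r w xs (r + 1 - l).toNat l rfl 0 0 0 (by omega) (by omega)
    have hclosed := pv_closed r w (r + 1 - l).toNat l (by omega) rfl
    simp only [zero_add] at hfold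
    omega
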